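-- pv_equiv track=rewrite | github.com/pjz2000/sideguy-solutions | scripts/authority-engine.py | path_rank
-- ===== SOURCE A (Python) =====
-- PATH_PRIORITY = [
--     ("hubs/",      1),
--     ("clusters/",  2),
--     ("concepts/",  3),
--     ("problems/",  4),
--     ("generated/", 5),
--     ("auto/",      6),
--     ("longtail/",  7),
--     ("/",          9),
-- ]
--
-- def path_rank(p: str) -> int:
--     p = p.replace("\\", "/")
--     for prefix, r in PATH_PRIORITY:
--         if prefix == "/" and ("/" not in p or p.count("/") == 0):
--             return r
--         if p.startswith(prefix):
--             return r
--     return 50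
-- ===== SOURCE B (Python) =====
-- _RANK = {"hubs": 1, "clusters": 2, "concepts": 3, "problems": 4,
--          "generated": 5, "auto": 6, "longtail": 7}
--
-- def path_rank(p: str) -> int:
--     p = p.replace("\\", "/")
--     if "/" not in p or p.startswith("/"):
--         return 9
--     first, _, _ = p.partition("/")
--     return _RANK.get(first, 50)
-- ===== Notes on version B (the rewrite author's own statement) =====
-- stated objective: idiomatic
-- what changed: Replaces the linear scan over the prefix table (with its special-cased '/' sentinel entry) by one sentinel check plus a dict lookup keyed on the first path component extracted with str.partition.
import Mathlib
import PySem

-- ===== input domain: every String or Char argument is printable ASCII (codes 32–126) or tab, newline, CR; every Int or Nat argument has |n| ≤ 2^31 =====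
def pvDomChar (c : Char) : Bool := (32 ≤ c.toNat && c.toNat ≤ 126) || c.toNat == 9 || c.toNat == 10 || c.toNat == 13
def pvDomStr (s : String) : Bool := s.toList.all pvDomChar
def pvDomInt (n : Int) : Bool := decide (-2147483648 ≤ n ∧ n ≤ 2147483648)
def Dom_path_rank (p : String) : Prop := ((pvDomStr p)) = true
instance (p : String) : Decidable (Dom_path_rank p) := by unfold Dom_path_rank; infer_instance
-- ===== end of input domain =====

set_option maxRecDepth 8192


-- B replaces A's linear scan over the prefix table (with its '/' sentinel entry) by one
-- sentinel check plus a dict lookup on the first path component (idiomatic; same cost class).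

-- ===== PORT A =====
def pathPriority : List (String × Int) :=
  [("hubs/", 1), ("clusters/", 2), ("concepts/", 3), ("problems/", 4),
   ("generated/", 5), ("auto/", 6), ("longtail/", 7), ("/", 9)]

def pathRankLoop (p : String) : List (String × Int) → Int
  | [] => 50
  | (pre, r) :: rest =>
    if pre == "/" && (!(PySem.Str.isIn "/" p) || PySem.Str.count p "/" == 0) then r
    else if PySem.Str.startswith p pre then r
    else pathRankLoop p rest

def path_rank (p : String) : Int :=
  pathRankLoop (PySem.Str.replace p "\\" "/") pathPriority

-- ===== PORT B =====
def pvRankTable : PySem.Dict (List Char) Int :=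
  PySem.Dict.ofList
    [("hubs".toList, 1), ("clusters".toList, 2), ("concepts".toList, 3), ("problems".toList, 4),
     ("generated".toList, 5), ("auto".toList, 6), ("longtail".toList, 7)]

def path_rank_alt (p : String) : Int :=
  let q := PySem.Str.replace p "\\" "/"
  if !(PySem.Str.isIn "/" q) || PySem.Str.startswith q "/" then 9
  else
    -- first component of q.partition("/"), ported by hand (no PySem partition):
    -- the characters before the first '/'; exact since '/' occurs in q here
    let first := q.toList.takeWhile (fun c => c ≠ '/')
    PySem.Dict.getD pvRankTable first 50

-- ===== PRECONDITION & SPEC =====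
def Spec_path_rank (p : String) (out : Int) : Prop := out = path_rank_alt p
instance (p : String) (out : Int) : Decidable (Spec_path_rank p out) := by unfold Spec_path_rank; infer_instance

-- ===== CLAIM (what is proved, stated in full; the proofs are below) =====
def Claim_equal_path_rank : Prop := ∀ (p : String), Dom_path_rank p → Spec_path_rank p (path_rank p)

-- ===== LEMMAS AND PROOFS =====

-- '"/" in l' is membership of the character '/'
theorem isIn_slash_iff (l : List Char) : PySem.Chars.isIn ['/'] l = true ↔ '/' ∈ l := by
  rw [PySem.Chars.isIn_iff_infix]
  exact List.singleton_infix_iff '/' l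

-- count.go never decreases below its accumulator
theorem count_go_le (sub : List Char) : ∀ (fuel : Nat) (l : List Char) (acc : Nat),
    acc ≤ PySem.Chars.count.go sub fuel l acc := by
  intro fuel
  induction fuel with
  | zero => intro l acc; simp [PySem.Chars.count.go]
  | succ n ih =>
    intro l acc
    cases l with
    | nil => simp [PySem.Chars.count.go]
    | cons h t =>
      rw [PySem.Chars.count.go]
      split
      · exact le_trans (Nat.le_succ acc) (ih _ _)
      · exact ih _ _

-- an occurring '/' is counted at least once
theorem count_slash_pos : ∀ (fuel : Nat) (l : List Char) (acc : Nat), l.length ≤ fuel → '/' ∈ l →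
    acc < PySem.Chars.count.go ['/'] fuel l acc := by
  intro fuel
  induction fuel with
  | zero =>
    intro l acc hlen hmem
    interval_cases h : l.length
    · simp [List.length_eq_zero_iff.mp h] at hmem
  | succ n ih =>
    intro l acc hlen hmem
    cases l with
    | nil => simp at hmem
    | cons h t =>
      rw [PySem.Chars.count.go]
      by_cases hp : List.isPrefixOf ['/'] (h :: t) = true
      · simp only [hp, if_true]
        exact lt_of_lt_of_le (Nat.lt_succ_self acc) (count_go_le _ _ _ _)
      · simp only [hp]
        have hne : h ≠ '/' := by
          intro he; subst he; simp [List.isPrefixOf] at hp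
        have : '/' ∈ t := by
          rcases List.mem_cons.mp hmem with h1 | h1
          · exact absurd h1.symm hne
          · exact h1
        exact ih t acc (by simpa using Nat.lt_succ_iff.mp (Nat.lt_of_lt_of_le (Nat.lt_succ_of_le (Nat.le_refl _)) (by simpa using hlen))) this

theorem count_slash_ne_zero (l : List Char) (h : '/' ∈ l) : PySem.Chars.count l ['/'] ≠ 0 := by
  have := count_slash_pos l.length l 0 (le_refl _) h
  simp [PySem.Chars.count]
  omega

-- startswith l (seg ++ "/") for slash-free seg ↔ '/' occurs and seg is the first component
theorem startswith_seg_slash (l seg : List Char) (hseg : '/' ∉ seg) :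
    (seg ++ ['/']).isPrefixOf l = true ↔ '/' ∈ l ∧ l.takeWhile (fun c => c ≠ '/') = seg := by
  constructor
  · intro hp
    rcases List.isPrefixOf_iff_prefix.mp hp with ⟨t, ht⟩
    subst ht
    constructor
    · simp
    · rw [List.append_assoc, List.takeWhile_append]
      have hall : ∀ c ∈ seg, (fun c => decide (c ≠ '/')) c = true := by
        intro c hc; simp; intro he; exact hseg (he ▸ hc)
      rw [List.takeWhile_eq_self_iff.mpr hall]
      simp
  · rintro ⟨hmem, htw⟩
    have hsplit : l = seg ++ l.dropWhile (fun c => c ≠ '/') := by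
      conv_lhs => rw [← List.takeWhile_append_dropWhile (p := fun c => decide (c ≠ '/')) (l := l)]
      rw [htw]
    have hdw : ∃ t, l.dropWhile (fun c => c ≠ '/') = '/' :: t := by
      rcases hd : l.dropWhile (fun c => c ≠ '/') with _ | ⟨c, t⟩
      · exfalso
        have : l.takeWhile (fun c => c ≠ '/') = l := by
          have := List.takeWhile_append_dropWhile (p := fun c => decide (c ≠ '/')) (l := l)
          rw [hd] at this; simpa using this
        rw [this] at htw; subst htw; exact hseg hmem
      · have h1 : List.dropWhile (fun c => decide (c ≠ '/')) l ≠ [] := by rw [hd]; simp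
        have h2 := List.head_dropWhile_not (p := fun c => decide (c ≠ '/')) (l := l) h1
        simp only [hd, List.head_cons] at h2
        have hc : c = '/' := by simpa using h2
        refine ⟨t, ?_⟩
        rw [hc]
    rcases hdw with ⟨t, ht⟩
    rw [hsplit, ht]
    apply List.isPrefixOf_iff_prefix.mpr
    exact ⟨t, by simp⟩


-- the decision chain of both programs, phrased over the character list of the normalized path
theorem pv_core (l : List Char) :
    (if "hubs/".toList.isPrefixOf l = true then (1 : Int)
     else if "clusters/".toList.isPrefixOf l = true then 2
     else if "concepts/".toList.isPrefixOf l = true then 3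
     else if "problems/".toList.isPrefixOf l = true then 4
     else if "generated/".toList.isPrefixOf l = true then 5
     else if "auto/".toList.isPrefixOf l = true then 6
     else if "longtail/".toList.isPrefixOf l = true then 7
     else if (!PySem.Chars.isIn "/".toList l || PySem.Chars.count l "/".toList == 0) = true then 9
     else if "/".toList.isPrefixOf l = true then 9
     else 50)
    = (if (!PySem.Chars.isIn "/".toList l || "/".toList.isPrefixOf l) = true then (9 : Int)
       else PySem.Dict.getD pvRankTable (l.takeWhile (fun c => c ≠ '/')) 50) := by
  have hsl : ("/" : String).toList = ['/'] := rfl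
  by_cases hmem : '/' ∈ l
  · have hin : PySem.Chars.isIn "/".toList l = true := by
      rw [hsl]; exact (isIn_slash_iff l).mpr hmem
    have hcount : (PySem.Chars.count l "/".toList == 0) = false := by
      rw [hsl]; simpa using count_slash_ne_zero l hmem
    have hpre : ∀ (seg : List Char), '/' ∉ seg →
        (seg ++ ['/']).isPrefixOf l = (l.takeWhile (fun c => c ≠ '/') == seg) := by
      intro seg hs
      by_cases hp : (seg ++ ['/']).isPrefixOf l = true
      · rw [hp]; exact (beq_iff_eq.mpr ((startswith_seg_slash l seg hs).mp hp).2).symm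
      · rw [Bool.not_eq_true] at hp
        rw [hp]
        symm
        rw [beq_eq_false_iff_ne]
        intro he
        rw [← Bool.not_eq_true] at hp
        exact hp ((startswith_seg_slash l seg hs).mpr ⟨hmem, he⟩)
    have e1 : ("hubs/" : String).toList = "hubs".toList ++ ['/'] := rfl
    have e2 : ("clusters/" : String).toList = "clusters".toList ++ ['/'] := rfl
    have e3 : ("concepts/" : String).toList = "concepts".toList ++ ['/'] := rfl
    have e4 : ("problems/" : String).toList = "problems".toList ++ ['/'] := rfl
    have e5 : ("generated/" : String).toList = "generated".toList ++ ['/'] := rfl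
    have e6 : ("auto/" : String).toList = "auto".toList ++ ['/'] := rfl
    have e7 : ("longtail/" : String).toList = "longtail".toList ++ ['/'] := rfl
    rw [e1, e2, e3, e4, e5, e6, e7,
      hpre _ (by decide), hpre _ (by decide), hpre _ (by decide), hpre _ (by decide),
      hpre _ (by decide), hpre _ (by decide), hpre _ (by decide), hin, hcount]
    set t := l.takeWhile (fun c => c ≠ '/') with ht
    by_cases hswl : "/".toList.isPrefixOf l = true
    · -- leading slash: t = [] and no table key matches
      have htnil : t = [] := by
        rw [hsl] at hswl
        rcases List.isPrefixOf_iff_prefix.mp hswl with ⟨r, hr⟩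
        rw [ht, ← hr]
        simp
      rw [hswl, htnil]
      decide
    · rw [Bool.not_eq_true] at hswl
      rw [hswl]
      simp only [Bool.not_true, Bool.or_false]
      by_cases h1 : t = "hubs".toList
      · rw [h1]; decide
      · by_cases h2 : t = "clusters".toList
        · rw [h2]; decide
        · by_cases h3 : t = "concepts".toList
          · rw [h3]; decide
          · by_cases h4 : t = "problems".toList
            · rw [h4]; decide
            · by_cases h5 : t = "generated".toList
              · rw [h5]; decide
              · by_cases h6 : t = "auto".toList
                · rw [h6]; decide
                · by_cases h7 : t = "longtail".toList
                  · rw [h7]; decide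
                  · simp only [beq_iff_eq, h1, h2, h3, h4, h5, h6, h7, if_false]
                    have : PySem.Dict.getD pvRankTable t 50 = 50 := by
                      show (PySem.Dict.getD (PySem.Dict.mk
                        [("hubs".toList, 1), ("clusters".toList, 2), ("concepts".toList, 3),
                         ("problems".toList, 4), ("generated".toList, 5), ("auto".toList, 6),
                         ("longtail".toList, 7)]) t 50) = 50
                      rw [PySem.Dict.getD_eq_get?_getD]
                      simp only [PySem.Dict.get?_mk_cons, beq_iff_eq]
                      rw [if_neg (fun h => h1 h.symm), if_neg (fun h => h2 h.symm),
                        if_neg (fun h => h3 h.symm), if_neg (fun h => h4 h.symm),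
                        if_neg (fun h => h5 h.symm), if_neg (fun h => h6 h.symm),
                        if_neg (fun h => h7 h.symm)]
                      rfl
                    rw [this]
                    decide
  · -- no slash anywhere: both sides give 9
    have hin : PySem.Chars.isIn "/".toList l = false := by
      rw [hsl, ← Bool.not_eq_true]
      intro h; exact hmem ((isIn_slash_iff l).mp h)
    have hpre : ∀ (s : String), '/' ∈ s.toList → s.toList.isPrefixOf l = false := by
      intro s hs
      rw [← Bool.not_eq_true]
      intro h
      rcases List.isPrefixOf_iff_prefix.mp h with ⟨r, hr⟩
      exact hmem (hr ▸ List.mem_append_left r hs)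
    rw [hpre "hubs/" (by decide), hpre "clusters/" (by decide), hpre "concepts/" (by decide),
      hpre "problems/" (by decide), hpre "generated/" (by decide), hpre "auto/" (by decide),
      hpre "longtail/" (by decide), hin]
    simp

-- ===== VERDICT (by name: the statement is the Claim_ definition above) =====
theorem path_rank_spec : Claim_equal_path_rank := by
  intro p _
  unfold Spec_path_rank path_rank path_rank_alt pathPriority
  simp only [pathRankLoop, PySem.Str.isIn_eq, PySem.Str.startswith_eq, PySem.Str.count_eq,
    PySem.Chars.startswith, String.reduceBEq, Bool.false_and, Bool.true_and,
    Bool.false_eq_true, if_false]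
  exact pv_core (PySem.Str.replace p "\\" "/").toList
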